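-- pv_equiv track=rewrite | github.com/liuyq123/SymptomPal | backend/app/services/cycle_engine.py | _cluster_days
-- ===== SOURCE A (Python) =====
-- from typing import Dict, List, Optional, Tuple
--
-- def _cluster_days(days: List[int], tolerance: int = 2) -> List[List[int]]:
--     """Cluster cycle days that are within tolerance of each other."""
--     if not days:
--         return []
--     clusters: List[List[int]] = []
--     current_cluster = [days[0]]
--     for day in days[1:]:
--         if day - current_cluster[-1] <= tolerance:
--             current_cluster.append(day)
--         else:
--             clusters.append(current_cluster)
--             current_cluster = [day]
--     clusters.append(current_cluster)
--     return clusters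
-- ===== SOURCE B (Python) =====
-- from typing import Dict, List, Optional, Tuple
--
-- def _cluster_days(days: List[int], tolerance: int = 2) -> List[List[int]]:
--     """Cluster cycle days that are within tolerance of each other."""
--     if not days:
--         return []
--     breaks = [i for i in range(1, len(days)) if days[i] - days[i - 1] > tolerance]
--     bounds = [0] + breaks + [len(days)]
--     return [days[a:b] for a, b in zip(bounds, bounds[1:])]
-- ===== Notes on version B (the rewrite author's own statement) =====
-- stated objective: alternative
-- what changed: B first computes the list of break indices (positions where the gap to the previous day exceeds tolerance) and then materialises the clusters by slicing days between consecutive boundaries, instead of A's single incremental append-or-flush accumulator loop.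
import Mathlib
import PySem

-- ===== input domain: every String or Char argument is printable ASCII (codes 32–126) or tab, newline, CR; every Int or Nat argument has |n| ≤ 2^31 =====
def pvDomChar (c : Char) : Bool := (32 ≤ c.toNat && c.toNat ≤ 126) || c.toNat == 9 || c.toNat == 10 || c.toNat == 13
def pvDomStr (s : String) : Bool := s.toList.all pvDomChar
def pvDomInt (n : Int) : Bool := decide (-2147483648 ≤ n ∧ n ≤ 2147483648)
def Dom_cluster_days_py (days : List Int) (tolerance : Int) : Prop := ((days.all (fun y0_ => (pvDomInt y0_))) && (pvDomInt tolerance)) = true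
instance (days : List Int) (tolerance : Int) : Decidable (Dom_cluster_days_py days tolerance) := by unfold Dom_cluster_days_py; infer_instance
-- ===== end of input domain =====

-- B computes the break indices in one pass and then materialises the clusters by slicing
-- between consecutive boundaries, instead of A's incremental append-or-flush loop; objective: alternative.

-- ===== PORT A =====
-- loop body: if day - current_cluster[-1] <= tolerance: append; else flush and restart
def astep (tolerance : Int) (st : List (List Int) × List Int) (day : Int) : List (List Int) × List Int :=
  if day - st.2.getLast! ≤ tolerance then (st.1, st.2 ++ [day]) else (st.1 ++ [st.2], [day])

def cluster_days_py (days : List Int) (tolerance : Int) : List (List Int) :=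
  match days with
  | [] => []
  | d0 :: rest =>
    let s := rest.foldl (astep tolerance) ([], [d0])
    s.1 ++ [s.2]

-- ===== PORT B =====
-- breaks = [i for i in range(1, len(days)) if days[i] - days[i-1] > tolerance]
-- bounds = [0] + breaks + [len(days)];  [days[a:b] for a, b in zip(bounds, bounds[1:])]
def cluster_days_py_alt (days : List Int) (tolerance : Int) : List (List Int) :=
  if days = [] then []
  else
    let n : Int := days.length
    let breaks := (PySem.List.pyRange 1 n 1).filter
      (fun i => decide (tolerance < PySem.List.pyGetD days i 0 - PySem.List.pyGetD days (i - 1) 0))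
    let bounds := 0 :: (breaks ++ [n])
    (bounds.zip bounds.tail).map (fun p => PySem.List.slice days (some p.1) (some p.2))

-- ===== PRECONDITION & SPEC =====
def Spec_cluster_days_py (days : List Int) (tolerance : Int) (out : List (List Int)) : Prop := out = cluster_days_py_alt days tolerance
instance (days : List Int) (tolerance : Int) (out : List (List Int)) : Decidable (Spec_cluster_days_py days tolerance out) := by unfold Spec_cluster_days_py; infer_instance

-- ===== CLAIM (what is proved, stated in full; the proofs are below) =====
def Claim_equal_cluster_days_py : Prop := ∀ (days : List Int) (tolerance : Int), Dom_cluster_days_py days tolerance → Spec_cluster_days_py days tolerance (cluster_days_py days tolerance)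

-- ===== LEMMAS AND PROOFS =====

-- intermediate form: the append-or-new-cluster step, read off the FRONT of the list
def bstep (tolerance day : Int) (clusters : List (List Int)) : List (List Int) :=
  match clusters with
  | [] => [[day]]
  | c :: cs => if c.headD 0 - day ≤ tolerance then (day :: c) :: cs else [day] :: c :: cs

-- merge a pending nonempty current cluster into an already-built cluster list
def glue (tolerance : Int) (cur : List Int) (C : List (List Int)) : List (List Int) :=
  match C with
  | [] => [cur]
  | c :: cs => if c.headD 0 - cur.getLast! ≤ tolerance then (cur ++ c) :: cs else cur :: c :: cs

theorem gl_concat (l : List Int) (d : Int) : (l ++ [d]).getLast! = d := by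
  cases l with
  | nil => rfl
  | cons a as => simp [List.getLast!]

theorem gl_single (d : Int) : ([d] : List Int).getLast! = d := rfl

theorem glue_step_le (tol day : Int) (cur : List Int) (C : List (List Int))
    (h : day - cur.getLast! ≤ tol) :
    glue tol (cur ++ [day]) C = glue tol cur (bstep tol day C) := by
  cases C with
  | nil =>
    simp only [bstep, glue, List.headD_cons]
    rw [if_pos h]
  | cons c cs =>
    simp only [bstep]
    by_cases hc : c.headD 0 - day ≤ tol
    · rw [if_pos hc]
      simp only [glue, List.headD_cons, gl_concat]
      rw [if_pos hc, if_pos h]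
      simp
    · rw [if_neg hc]
      simp only [glue, List.headD_cons, gl_concat]
      rw [if_neg hc, if_pos h]

theorem glue_step_gt (tol day : Int) (cur : List Int) (C : List (List Int))
    (h : ¬ day - cur.getLast! ≤ tol) :
    cur :: glue tol [day] C = glue tol cur (bstep tol day C) := by
  cases C with
  | nil =>
    simp only [bstep, glue, List.headD_cons]
    rw [if_neg h]
  | cons c cs =>
    simp only [bstep]
    by_cases hc : c.headD 0 - day ≤ tol
    · rw [if_pos hc]
      simp only [glue, List.headD_cons, gl_single]
      rw [if_pos hc, if_neg h]
      simp
    · rw [if_neg hc]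
      simp only [glue, List.headD_cons, gl_single]
      rw [if_neg hc, if_neg h]

theorem glue_single (tol d : Int) (C : List (List Int)) :
    glue tol [d] C = bstep tol d C := by
  cases C with
  | nil => rfl
  | cons c cs => simp [glue, bstep]

theorem loop_glue (tol : Int) (rest : List Int) :
    ∀ (acc : List (List Int)) (cur : List Int),
      (rest.foldl (astep tol) (acc, cur)).1 ++ [(rest.foldl (astep tol) (acc, cur)).2]
        = acc ++ glue tol cur (rest.foldr (bstep tol) []) := by
  induction rest with
  | nil => intro acc cur; simp [glue]
  | cons day rest' ih =>
    intro acc cur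
    simp only [List.foldl_cons, List.foldr_cons, astep]
    by_cases h : day - cur.getLast! ≤ tol
    · rw [if_pos h, ih acc (cur ++ [day]), glue_step_le tol day cur _ h]
    · rw [if_neg h, ih (acc ++ [cur]) [day], List.append_assoc, List.singleton_append,
        glue_step_gt tol day cur _ h]

theorem A_eq_foldr_bstep (days : List Int) (tol : Int) :
    cluster_days_py days tol = days.foldr (bstep tol) [] := by
  cases days with
  | nil => rfl
  | cons d rest =>
    simp only [cluster_days_py, List.foldr_cons]
    rw [loop_glue tol rest [] [d], List.nil_append, glue_single]

-- ============ the B side: staged boundaries + slices equal the bstep fold ============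

theorem pyRange_shift (n : Int) :
    PySem.List.pyRange 2 (n + 1) 1 = (PySem.List.pyRange 1 n 1).map (· + 1) := by
  rw [PySem.List.pyRange_one, PySem.List.pyRange_one]
  have h : n + 1 - 2 = n - 1 := by ring
  rw [h, List.map_map]
  exact List.map_congr_left (fun k _ => by simp; ring)

theorem pyGetD_cons_succ (x : Int) (xs : List Int) (i : Int) (h : 0 ≤ i) :
    PySem.List.pyGetD (x :: xs) (i + 1) 0 = PySem.List.pyGetD xs i 0 := by
  rw [PySem.List.pyGetD_of_nonneg _ _ (by omega), PySem.List.pyGetD_of_nonneg _ _ h]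
  have ht : (i + 1).toNat = i.toNat + 1 := by omega
  simp [ht]

theorem slice_cons_succ (x : Int) (xs : List Int) (a b : Int) (ha : 0 ≤ a) (hb : 0 ≤ b) :
    PySem.List.slice (x :: xs) (some (a + 1)) (some (b + 1)) = PySem.List.slice xs (some a) (some b) := by
  rw [PySem.List.slice_toNat _ (by omega) (by omega), PySem.List.slice_toNat _ ha hb]
  have h1 : (a + 1).toNat = a.toNat + 1 := by omega
  have h2 : (b + 1).toNat = b.toNat + 1 := by omega
  simp [h1, h2]

theorem slice_cons_zero_succ (x : Int) (xs : List Int) (b : Int) (hb : 0 ≤ b) :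
    PySem.List.slice (x :: xs) (some 0) (some (b + 1)) = x :: PySem.List.slice xs (some 0) (some b) := by
  rw [PySem.List.slice_toNat _ (le_refl 0) (by omega), PySem.List.slice_toNat _ (le_refl 0) hb]
  have h2 : (b + 1).toNat = b.toNat + 1 := by omega
  simp [h2]

theorem slice_head (e : Int) (rest : List Int) (x : Int) (hx : 1 ≤ x) :
    PySem.List.slice (e :: rest) (some 0) (some x) = e :: rest.take (x.toNat - 1) := by
  rw [PySem.List.slice_toNat _ (le_refl 0) (by omega)]
  have h : x.toNat = (x.toNat - 1) + 1 := by omega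
  rw [h]
  simp

-- the break indices of B, as a named abbreviation for the lemmas
def breaksOf (ds : List Int) (tol : Int) : List Int :=
  (PySem.List.pyRange 1 ds.length 1).filter
    (fun i => decide (tol < PySem.List.pyGetD ds i 0 - PySem.List.pyGetD ds (i - 1) 0))

theorem mem_breaksOf (ds : List Int) (tol x : Int) (hx : x ∈ breaksOf ds tol) :
    1 ≤ x ∧ x < ds.length :=
  (PySem.List.mem_pyRange_one).1 (List.mem_of_mem_filter hx)

theorem breaksOf_cons (d e : Int) (rest : List Int) (tol : Int) :
    breaksOf (d :: e :: rest) tol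
      = (if tol < e - d then [1] else []) ++ (breaksOf (e :: rest) tol).map (· + 1) := by
  unfold breaksOf
  have hlen : ((d :: e :: rest).length : Int) = ((e :: rest).length : Int) + 1 := by simp
  rw [hlen]
  rw [PySem.List.pyRange_one_cons (by simp only [List.length_cons]; push_cast; omega)]
  rw [List.filter_cons]
  have h1 : PySem.List.pyGetD (d :: e :: rest) 1 0 - PySem.List.pyGetD (d :: e :: rest) (1 - 1) 0 = e - d := by
    norm_num [PySem.List.pyGetD_of_nonneg _ _ (by norm_num : (0:Int) ≤ 1),
      PySem.List.pyGetD_zero_cons]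
  rw [show (1:Int) + 1 = 2 by norm_num, pyRange_shift, List.filter_map]
  have h2 : ((PySem.List.pyRange 1 ((e :: rest).length : Int) 1).filter
        ((fun i => decide (tol < PySem.List.pyGetD (d :: e :: rest) i 0 - PySem.List.pyGetD (d :: e :: rest) (i - 1) 0)) ∘ (· + 1)))
      = (PySem.List.pyRange 1 ((e :: rest).length : Int) 1).filter
        (fun i => decide (tol < PySem.List.pyGetD (e :: rest) i 0 - PySem.List.pyGetD (e :: rest) (i - 1) 0)) := by
    apply List.filter_congr
    intro i hi
    have hi' := (PySem.List.mem_pyRange_one).1 hi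
    simp only [Function.comp]
    have e1 : PySem.List.pyGetD (d :: e :: rest) (i + 1) 0 = PySem.List.pyGetD (e :: rest) i 0 :=
      pyGetD_cons_succ _ _ _ (by omega)
    have e2 : PySem.List.pyGetD (d :: e :: rest) (i + 1 - 1) 0 = PySem.List.pyGetD (e :: rest) (i - 1) 0 := by
      have h3 : i + 1 - 1 = (i - 1) + 1 := by ring
      rw [h3, pyGetD_cons_succ _ _ _ (by omega)]
    rw [e1, e2]
  rw [h2, h1]
  by_cases hgap : tol < e - d
  · rw [if_pos (by exact decide_eq_true hgap), if_pos hgap]; rfl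
  · rw [if_neg (by simpa using hgap), if_neg hgap]; rfl

-- the key step: B on d :: ds is the bstep of B on ds
theorem alt_cons (tol d e : Int) (rest : List Int) :
    cluster_days_py_alt (d :: e :: rest) tol = bstep tol d (cluster_days_py_alt (e :: rest) tol) := by
  unfold cluster_days_py_alt
  rw [if_neg (by simp : ¬(d :: e :: rest) = []), if_neg (by simp : ¬(e :: rest) = [])]
  simp only []
  rw [show ((PySem.List.pyRange 1 ((d :: e :: rest).length : Int) 1).filter
      (fun i => decide (tol < PySem.List.pyGetD (d :: e :: rest) i 0 - PySem.List.pyGetD (d :: e :: rest) (i - 1) 0)))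
      = breaksOf (d :: e :: rest) tol from rfl,
    show ((PySem.List.pyRange 1 ((e :: rest).length : Int) 1).filter
      (fun i => decide (tol < PySem.List.pyGetD (e :: rest) i 0 - PySem.List.pyGetD (e :: rest) (i - 1) 0)))
      = breaksOf (e :: rest) tol from rfl,
    breaksOf_cons]
  set B := breaksOf (e :: rest) tol with hB
  have hBmem : ∀ x ∈ B, 1 ≤ x ∧ x < ((e :: rest).length : Int) := fun x hx => mem_breaksOf _ _ _ hx
  set m : Int := ((e :: rest).length : Int) with hm
  have hm1 : 1 ≤ m := by rw [hm]; simp only [List.length_cons]; push_cast; omega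
  have hn : ((d :: e :: rest).length : Int) = m + 1 := by rw [hm]; simp
  set L : List Int := B ++ [m] with hL
  have hLmem : ∀ x ∈ L, 1 ≤ x := by
    intro x hx
    rcases List.mem_append.1 hx with h | h
    · exact (hBmem x h).1
    · simp at h; omega
  obtain ⟨x, xs, hLx⟩ := List.exists_cons_of_ne_nil (by simp [hL] : L ≠ [])
  have hx1 : 1 ≤ x := hLmem x (by rw [hLx]; exact List.mem_cons_self)
  have hmapL : B.map (· + 1) ++ [m + 1] = L.map (· + 1) := by simp [hL]
  -- B on (e :: rest), destructured
  have halt2 : ((0 :: L).zip L).map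
        (fun p => PySem.List.slice (e :: rest) (some p.1) (some p.2))
      = (e :: rest.take (x.toNat - 1))
          :: ((x :: xs).zip xs).map (fun p => PySem.List.slice (e :: rest) (some p.1) (some p.2)) := by
    rw [hLx]
    simp only [List.zip_cons_cons, List.map_cons]
    rw [slice_head e rest x hx1]
  simp only [List.tail_cons]
  by_cases hgap : tol < e - d
  · -- break at index 1: clusters are [d] :: clusters of (e :: rest)
    rw [if_pos hgap, hn]
    rw [show ([(1:Int)] ++ B.map (· + 1)) ++ [m + 1] = 1 :: (B.map (· + 1) ++ [m + 1]) by simp]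
    rw [hmapL]
    simp only [List.zip_cons_cons]
    rw [show ((1:Int) :: L.map (· + 1)) = ((0 :: L).map (· + 1)) by simp,
      List.zip_map, List.map_cons, List.map_map]
    have hs0 : PySem.List.slice (d :: e :: rest) (some 0) (some 1) = [d] := by
      rw [PySem.List.slice_toNat _ (le_refl 0) (by norm_num)]; simp
    rw [hs0]
    have hshift : (((0 : Int) :: L).zip L).map
          ((fun p => PySem.List.slice (d :: e :: rest) (some p.1) (some p.2))
            ∘ (Prod.map (· + 1) (· + 1)))
        = (((0 : Int) :: L).zip L).map
          (fun p => PySem.List.slice (e :: rest) (some p.1) (some p.2)) := by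
      apply List.map_congr_left
      intro p hp
      obtain ⟨a, b⟩ := p
      have h := List.of_mem_zip hp
      have ha : 0 ≤ a := by
        rcases List.mem_cons.1 h.1 with h' | h'
        · omega
        · have := hLmem a h'; omega
      have hb : 0 ≤ b := by have := hLmem b h.2; omega
      simp only [Function.comp, Prod.map]
      exact slice_cons_succ d (e :: rest) a b ha hb
    rw [hshift, halt2]
    simp only [bstep, List.headD_cons]
    rw [if_neg (by omega)]
  · -- no break at index 1: d joins the first cluster of (e :: rest)
    rw [if_neg hgap, hn, List.nil_append, hmapL, hLx]
    simp only [List.map_cons, List.zip_cons_cons]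
    rw [show (((x + 1) :: xs.map (· + 1)) : List Int) = ((x :: xs).map (· + 1)) from rfl,
      List.zip_map, List.map_map]
    have hshift : (((x : Int) :: xs).zip xs).map
          ((fun p => PySem.List.slice (d :: e :: rest) (some p.1) (some p.2))
            ∘ (Prod.map (· + 1) (· + 1)))
        = (((x : Int) :: xs).zip xs).map
          (fun p => PySem.List.slice (e :: rest) (some p.1) (some p.2)) := by
      apply List.map_congr_left
      intro p hp
      obtain ⟨a, b⟩ := p
      have h := List.of_mem_zip hp
      have ha : 0 ≤ a := by have := hLmem a (by rw [hLx]; exact h.1); omega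
      have hb : 0 ≤ b := by have := hLmem b (by rw [hLx]; exact List.mem_cons_of_mem _ h.2); omega
      simp only [Function.comp, Prod.map]
      exact slice_cons_succ d (e :: rest) a b ha hb
    rw [hshift, slice_cons_zero_succ d (e :: rest) x (by omega)]
    simp only [bstep]
    rw [slice_head e rest x hx1]
    simp only [List.headD_cons]
    rw [if_pos (by omega)]

theorem alt_single (tol d : Int) : cluster_days_py_alt [d] tol = [[d]] := by
  unfold cluster_days_py_alt
  norm_num
  rw [PySem.List.slice_to _ (by norm_num : (0:Int) ≤ 1)]
  simp

theorem foldr_eq_alt (tol : Int) (days : List Int) :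
    days.foldr (bstep tol) [] = cluster_days_py_alt days tol := by
  induction days with
  | nil => rfl
  | cons d ds ih =>
    cases ds with
    | nil => rw [alt_single]; rfl
    | cons e rest =>
      simp only [List.foldr_cons] at ih ⊢
      rw [ih, alt_cons]

-- ===== VERDICT (by name: the statement is the Claim_ definition above) =====
theorem cluster_days_py_spec : Claim_equal_cluster_days_py := by
  intro days tolerance _
  unfold Spec_cluster_days_py
  rw [A_eq_foldr_bstep, foldr_eq_alt]
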